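-- pv_equiv track=rewrite | github.com/Creepr6/Informatice5 | 12b - roosters/kleurendriehoek.py | kleuren
-- ===== SOURCE A (Python) =====
-- def kleuren(kleurendriehoek):
--     groen = 0
--     geel = 0
--     rood = 0
--     for i in range(len(kleurendriehoek)):
--         for k in range(len(kleurendriehoek[i])):
--             if kleurendriehoek[i][k] == 'Y':
--                 geel += 1
--             elif kleurendriehoek[i][k] == 'G':
--                 groen += 1
--             elif kleurendriehoek[i][k] == 'R':
--                 rood += 1
--
--     return groen, rood, geel
-- ===== SOURCE B (Python) =====
-- def kleuren(kleurendriehoek):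
--     # three staged passes: count each color over the whole grid separately,
--     # using list.count per row -- no per-element branching, no shared accumulator
--     groen = sum(row.count('G') for row in kleurendriehoek)
--     rood = sum(row.count('R') for row in kleurendriehoek)
--     geel = sum(row.count('Y') for row in kleurendriehoek)
--     return groen, rood, geel
-- ===== Notes on version B (the rewrite author's own statement) =====
-- stated objective: idiomatic
-- what changed: B makes three staged passes, each summing row.count(color) over the grid for one color, instead of A's single nested scan with a three-way branch updating three counters.
import Mathlib
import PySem

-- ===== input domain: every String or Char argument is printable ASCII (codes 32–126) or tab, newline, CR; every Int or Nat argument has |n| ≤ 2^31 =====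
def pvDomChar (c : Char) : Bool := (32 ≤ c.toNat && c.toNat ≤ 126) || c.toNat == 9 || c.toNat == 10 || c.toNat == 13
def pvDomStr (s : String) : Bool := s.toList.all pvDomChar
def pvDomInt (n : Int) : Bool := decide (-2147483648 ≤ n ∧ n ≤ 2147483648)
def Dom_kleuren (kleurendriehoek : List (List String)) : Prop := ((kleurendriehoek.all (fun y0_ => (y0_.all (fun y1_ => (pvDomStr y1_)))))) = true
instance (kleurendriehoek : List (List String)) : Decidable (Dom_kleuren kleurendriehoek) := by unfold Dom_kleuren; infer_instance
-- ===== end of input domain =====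

-- B replaces A's single nested branch-and-increment scan with three staged passes,
-- one per color, each summing row.count(color) (idiomatic; no speed claim).

-- ===== PORT A =====
def kleurenStep (s : Int × Int × Int) (c : String) : Int × Int × Int :=
  if c == "Y" then (s.1, s.2.1 + 1, s.2.2)
  else if c == "G" then (s.1 + 1, s.2.1, s.2.2)
  else if c == "R" then (s.1, s.2.1, s.2.2 + 1)
  else s

-- state is (groen, geel, rood); A returns groen, rood, geel
def kleuren (kleurendriehoek : List (List String)) : Int × Int × Int :=
  let s := kleurendriehoek.foldl (fun s row => row.foldl kleurenStep s) (0, 0, 0)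
  (s.1, s.2.2, s.2.1)

-- ===== PORT B =====
-- sum(row.count(c) for row in grid)
def kleurenCount (g : List (List String)) (c : String) : Int :=
  g.foldl (fun acc row => acc + (row.count c : Int)) 0

def kleuren_alt (kleurendriehoek : List (List String)) : Int × Int × Int :=
  (kleurenCount kleurendriehoek "G", kleurenCount kleurendriehoek "R",
   kleurenCount kleurendriehoek "Y")

-- ===== PRECONDITION & SPEC =====
def Spec_kleuren (kleurendriehoek : List (List String)) (out : Int × Int × Int) : Prop := out = kleuren_alt kleurendriehoek
instance (kleurendriehoek : List (List String)) (out : Int × Int × Int) : Decidable (Spec_kleuren kleurendriehoek out) := by unfold Spec_kleuren; infer_instance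

-- ===== CLAIM =====
def Claim_equal_kleuren : Prop := ∀ (kleurendriehoek : List (List String)), Dom_kleuren kleurendriehoek → Spec_kleuren kleurendriehoek (kleuren kleurendriehoek)

-- ===== LEMMAS AND PROOFS =====

lemma rowA (row : List String) : ∀ gr ge r : Int,
    row.foldl kleurenStep (gr, ge, r)
      = (gr + row.count "G", ge + row.count "Y", r + row.count "R") := by
  induction row with
  | nil => intro gr ge r; simp
  | cons c t ih =>
    intro gr ge r
    simp only [List.foldl_cons, List.count_cons, kleurenStep]
    by_cases hY : c = "Y" <;> by_cases hG : c = "G" <;> by_cases hR : c = "R" <;>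
      simp_all <;> omega

lemma gridA (g : List (List String)) : ∀ gr ge r : Int,
    g.foldl (fun s row => row.foldl kleurenStep s) (gr, ge, r)
      = (gr + (g.flatMap id).count "G", ge + (g.flatMap id).count "Y",
         r + (g.flatMap id).count "R") := by
  induction g with
  | nil => intro gr ge r; simp
  | cons row t ih =>
    intro gr ge r
    simp only [List.foldl_cons, rowA, ih, List.flatMap_cons, List.count_append, id]
    refine Prod.ext ?_ (Prod.ext ?_ ?_) <;> simp <;> omega

lemma countB (g : List (List String)) (c : String) : ∀ a : Int,
    g.foldl (fun acc row => acc + (row.count c : Int)) a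
      = a + (g.flatMap id).count c := by
  induction g with
  | nil => intro a; simp
  | cons row t ih =>
    intro a
    simp only [List.foldl_cons, ih, List.flatMap_cons, List.count_append, id]
    push_cast; ring

-- ===== VERDICT =====
theorem kleuren_spec : Claim_equal_kleuren := by
  intro g _
  show _ = _
  simp only [kleuren, kleuren_alt, kleurenCount, gridA, countB]
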